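-- pv_equiv track=rewrite | github.com/MolCrafts/molpy | src/molpy/io/forcefield/moltemplate.py | _get_element_from_type
-- ===== SOURCE A (Python) =====
-- def _get_element_from_type(atom_type: str) -> str:
--     """Get element symbol from atom type name."""
--     # Simple mapping - could be enhanced with more sophisticated logic
--     element_map = {
--         "OW": "O",  # Oxygen in water
--         "HW": "H",  # Hydrogen in water
--         "CW": "C",  # Carbon in water
--         "NW": "N",  # Nitrogen in water
--         "SW": "S",  # Sulfur in water
--         "PW": "P",  # Phosphorus in water
--     }
--
--     # Try to extract element from type name
--     for type_prefix, element in element_map.items():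
--         if atom_type.startswith(type_prefix):
--             return element
--
--     # Default: try to extract first letter as element
--     if atom_type and atom_type[0].isupper():
--         return atom_type[0]
--
--     return "X"  # Unknown element
-- ===== SOURCE B (Python) =====
-- def _get_element_from_type(atom_type: str) -> str:
--     """Get element symbol from atom type name."""
--     # Every table entry maps an uppercase-initial prefix to its own first
--     # letter, so the table is redundant: the first character decides.
--     if atom_type and atom_type[0].isupper():
--         return atom_type[0]
--     return "X"
-- ===== Notes on version B (the rewrite author's own statement) =====
-- stated objective: simpler
-- what changed: Dropped the prefix table and its scan entirely: since every table value is just the uppercase first letter of its key, B returns the first character when it is uppercase and otherwise falls through to the unknown-element default.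
import Mathlib
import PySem

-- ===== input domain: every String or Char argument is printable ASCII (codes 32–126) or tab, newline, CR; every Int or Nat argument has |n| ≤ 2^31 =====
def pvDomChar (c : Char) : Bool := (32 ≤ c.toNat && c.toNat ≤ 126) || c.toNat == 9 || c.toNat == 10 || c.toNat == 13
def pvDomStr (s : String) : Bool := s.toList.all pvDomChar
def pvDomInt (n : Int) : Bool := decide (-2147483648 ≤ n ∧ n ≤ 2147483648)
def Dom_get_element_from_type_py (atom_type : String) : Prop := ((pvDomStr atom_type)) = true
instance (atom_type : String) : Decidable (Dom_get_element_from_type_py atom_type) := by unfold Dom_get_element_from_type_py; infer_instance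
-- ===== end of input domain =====

-- B drops A's prefix table: every table value is the uppercase first letter of its key,
-- so the first-character test alone already gives A's answer (objective: simpler).

-- ===== PORT A =====
-- the for-loop over element_map.items() with early return, as structural recursion
def pvScanMap (atom_type : String) : List (String × String) → Option String
  | [] => none
  | (type_prefix, element) :: rest =>
      if PySem.Str.startswith atom_type type_prefix then some element
      else pvScanMap atom_type rest

def get_element_from_type_py (atom_type : String) : String :=
  let element_map : List (String × String) :=
    [("OW", "O"), ("HW", "H"), ("CW", "C"), ("NW", "N"), ("SW", "S"), ("PW", "P")]
  match pvScanMap atom_type element_map with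
  | some element => element
  | none =>
      -- if atom_type and atom_type[0].isupper(): return atom_type[0]
      if atom_type ≠ "" then
        match PySem.Str.pyGet? atom_type 0 with
        | some c => if PySem.Chars.isupper c then String.ofList [c] else "X"
        | none => "X"  -- unreachable: atom_type is non-empty
      else "X"

-- ===== PORT B =====
def get_element_from_type_py_alt (atom_type : String) : String :=
  match atom_type.toList with
  | c :: _ => if PySem.Chars.isupper c then String.ofList [c] else "X"
  | [] => "X"

-- ===== PRECONDITION & SPEC =====
def Spec_get_element_from_type_py (atom_type : String) (out : String) : Prop := out = get_element_from_type_py_alt atom_type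
instance (atom_type : String) (out : String) : Decidable (Spec_get_element_from_type_py atom_type out) := by unfold Spec_get_element_from_type_py; infer_instance

-- ===== CLAIM (what is proved, stated in full; the proofs are below) =====
def Claim_equal_get_element_from_type_py : Prop := ∀ (atom_type : String), Dom_get_element_from_type_py atom_type → Spec_get_element_from_type_py atom_type (get_element_from_type_py atom_type)


-- ===== LEMMAS AND PROOFS =====

-- a startswith on a two-character literal pins down the first two characters
theorem startswith_two (s p : String) (a b : Char) (hp : p.toList = [a, b])
    (h : PySem.Str.startswith s p = true) :
    ∃ rest, s.toList = a :: b :: rest := by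
  rw [PySem.Str.startswith_eq, PySem.Chars.startswith_iff, hp] at h
  obtain ⟨t, ht⟩ := h
  exact ⟨t, ht.symm⟩

theorem get_element_from_type_py_eq (atom_type : String) :
    get_element_from_type_py atom_type = get_element_from_type_py_alt atom_type := by
  rcases hc : atom_type.toList with _ | ⟨c, rest⟩
  · have h0 : atom_type = "" := by
      have := congrArg String.ofList hc
      simpa using this
    subst h0; decide
  · have hne : atom_type ≠ "" := by
      intro h; rw [h] at hc; simp at hc
    have hget : PySem.Str.pyGet? atom_type 0 = some c := by
      simp [PySem.Str.pyGet?_eq, hc]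
    by_cases h1 : PySem.Str.startswith atom_type "OW" = true
    · obtain ⟨r, hr⟩ := startswith_two _ _ 'O' 'W' (by decide) h1
      rw [hc] at hr; injection hr with h' h''; subst h'; subst h''
      simp [get_element_from_type_py, get_element_from_type_py_alt, pvScanMap,
            PySem.Chars.startswith, List.isPrefixOf, hc]
      decide
    by_cases h2 : PySem.Str.startswith atom_type "HW" = true
    · obtain ⟨r, hr⟩ := startswith_two _ _ 'H' 'W' (by decide) h2
      rw [hc] at hr; injection hr with h' h''; subst h'; subst h''
      simp [get_element_from_type_py, get_element_from_type_py_alt, pvScanMap,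
            PySem.Chars.startswith, List.isPrefixOf, hc]
      decide
    by_cases h3 : PySem.Str.startswith atom_type "CW" = true
    · obtain ⟨r, hr⟩ := startswith_two _ _ 'C' 'W' (by decide) h3
      rw [hc] at hr; injection hr with h' h''; subst h'; subst h''
      simp [get_element_from_type_py, get_element_from_type_py_alt, pvScanMap,
            PySem.Chars.startswith, List.isPrefixOf, hc]
      decide
    by_cases h4 : PySem.Str.startswith atom_type "NW" = true
    · obtain ⟨r, hr⟩ := startswith_two _ _ 'N' 'W' (by decide) h4
      rw [hc] at hr; injection hr with h' h''; subst h'; subst h''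
      simp [get_element_from_type_py, get_element_from_type_py_alt, pvScanMap,
            PySem.Chars.startswith, List.isPrefixOf, hc]
      decide
    by_cases h5 : PySem.Str.startswith atom_type "SW" = true
    · obtain ⟨r, hr⟩ := startswith_two _ _ 'S' 'W' (by decide) h5
      rw [hc] at hr; injection hr with h' h''; subst h'; subst h''
      simp [get_element_from_type_py, get_element_from_type_py_alt, pvScanMap,
            PySem.Chars.startswith, List.isPrefixOf, hc]
      decide
    by_cases h6 : PySem.Str.startswith atom_type "PW" = true
    · obtain ⟨r, hr⟩ := startswith_two _ _ 'P' 'W' (by decide) h6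
      rw [hc] at hr; injection hr with h' h''; subst h'; subst h''
      simp [get_element_from_type_py, get_element_from_type_py_alt, pvScanMap,
            PySem.Chars.startswith, List.isPrefixOf, hc]
      decide
    simp only [PySem.Str.startswith_eq, hc,
               show ("OW":String).toList = ['O','W'] by simp, show ("HW":String).toList = ['H','W'] by simp,
               show ("CW":String).toList = ['C','W'] by simp, show ("NW":String).toList = ['N','W'] by simp,
               show ("SW":String).toList = ['S','W'] by simp, show ("PW":String).toList = ['P','W'] by simp]
      at h1 h2 h3 h4 h5 h6
    simp [get_element_from_type_py, get_element_from_type_py_alt, pvScanMap,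
          h1, h2, h3, h4, h5, h6, hne, hc]

-- ===== VERDICT (by name: the statement is the Claim_ definition above) =====
theorem get_element_from_type_py_spec : Claim_equal_get_element_from_type_py := by
  intro atom_type _
  unfold Spec_get_element_from_type_py
  exact get_element_from_type_py_eq atom_type
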